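-- pv_equiv track=rewrite | github.com/Minion-Lover/pdf2text | pdf2text.py | check_for_dash
-- ===== SOURCE A (Python) =====
-- def check_for_dash(element):
--     element = element.replace(" ", "")
--
--     setlist = []
--     for n in range(len(element)):
--         setlist.append(element[n])
--
--     setlist = list(set(setlist))
--
--     if len(setlist) == 1:
--         return False
--     else:
--         return True
-- ===== SOURCE B (Python) =====
-- def check_for_dash(element):
--     element = element.replace(" ", "")
--     if not element:
--         return True
--     first = element[0]
--     for c in element[1:]:
--         if c != first:
--             return True
--     return False
-- ===== Notes on version B (the rewrite author's own statement) =====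
-- stated objective: simpler
-- what changed: Replaces the index loop + set construction + distinct-count with a single short-circuiting scan comparing every character against the first (empty string returns True, matching A's count-!=-1 rule).
import Mathlib
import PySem

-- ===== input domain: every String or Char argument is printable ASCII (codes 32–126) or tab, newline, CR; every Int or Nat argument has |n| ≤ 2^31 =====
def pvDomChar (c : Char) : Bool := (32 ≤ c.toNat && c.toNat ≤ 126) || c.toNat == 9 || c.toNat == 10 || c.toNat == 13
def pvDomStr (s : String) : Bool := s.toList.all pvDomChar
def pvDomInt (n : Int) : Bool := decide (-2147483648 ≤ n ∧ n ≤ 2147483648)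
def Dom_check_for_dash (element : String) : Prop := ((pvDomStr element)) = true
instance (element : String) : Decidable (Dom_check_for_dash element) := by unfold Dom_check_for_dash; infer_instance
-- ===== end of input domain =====

-- B replaces A's index-loop + set construction + distinct-count with one short-circuiting
-- scan against the first non-space character (objective: simpler).
-- ===== PORT A =====
def check_for_dash (element : String) : Bool :=
  let element := PySem.Str.replace element " " ""
  let setlist : List Char :=
    (PySem.List.pyRange 0 (PySem.Str.len element) 1).foldl
      (fun acc n => acc ++ [PySem.List.pyGetD element.toList n ' ']) []
  let setlist : List Char := PySem.Set.ofList setlist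
  if setlist.length == 1 then false else true

-- ===== PORT B =====
-- B: one short-circuiting scan over the remaining chars against the first; empty -> true
def check_for_dash_alt (element : String) : Bool :=
  match (PySem.Str.replace element " " "").toList with
  | [] => true
  | first :: rest => rest.any (fun c => c != first)

-- ===== PRECONDITION & SPEC =====
def Spec_check_for_dash (element : String) (out : Bool) : Prop := out = check_for_dash_alt element
instance (element : String) (out : Bool) : Decidable (Spec_check_for_dash element out) := by unfold Spec_check_for_dash; infer_instance

-- ===== CLAIM (what is proved, stated in full; the proofs are below) =====
def Claim_equal_check_for_dash : Prop := ∀ (element : String), Dom_check_for_dash element → Spec_check_for_dash element (check_for_dash element)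

-- ===== LEMMAS AND PROOFS =====

-- ===== VERDICT (by name: the statement is the Claim_ definition above) =====
-- nodup list whose elements all equal f, headed by f, is [f]
lemma nodup_all_eq {l : List Char} {f : Char} (hn : l.Nodup) (hf : f ∈ l)
    (hall : ∀ x ∈ l, x = f) : l = [f] := by
  cases l with
  | nil => cases hf
  | cons a t =>
    have ha : a = f := hall a (List.mem_cons_self ..)
    subst ha
    cases t with
    | nil => rfl
    | cons b u =>
      have hb : b = a := hall b (by simp)
      subst hb
      simp at hn

lemma ofList_len_one (f : Char) (rest : List Char) :
    (PySem.Set.ofList (f :: rest)).length = 1 ↔ ∀ c ∈ rest, c = f := by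
  constructor
  · intro h c hc
    obtain ⟨a, ha⟩ := List.length_eq_one_iff.mp h
    have hf : f ∈ PySem.Set.ofList (f :: rest) := by
      rw [PySem.Set.mem_ofList]; simp
    have hcm : c ∈ PySem.Set.ofList (f :: rest) := by
      rw [PySem.Set.mem_ofList]; simp [hc]
    rw [ha] at hf hcm
    simp at hf hcm; rw [hf, hcm]
  · intro h
    have hfm : f ∈ PySem.Set.ofList (f :: rest) := by
      rw [PySem.Set.mem_ofList]; exact List.mem_cons_self ..
    have hall2 : ∀ x ∈ PySem.Set.ofList (f :: rest), x = f := by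
      intro x hx
      rw [PySem.Set.mem_ofList] at hx
      rcases List.mem_cons.mp hx with h1 | h2
      · exact h1
      · exact h x h2
    rw [nodup_all_eq (PySem.Set.nodup_ofList (f :: rest)) hfm hall2]; rfl

lemma build_eq (cs : List Char) :
    (PySem.List.pyRange 0 (cs.length : Int) 1).foldl
      (fun acc n => acc ++ [PySem.List.pyGetD cs n ' ']) [] = cs := by
  rw [PySem.List.foldl_pyRange_zero_pyGetD' cs ' ' (fun acc c => acc ++ [c]) []]
  induction cs using List.reverseRecOn with
  | nil => rfl
  | append_singleton xs x ih => simp [ih]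

theorem check_for_dash_spec : Claim_equal_check_for_dash := by
  intro element _
  unfold Spec_check_for_dash check_for_dash check_for_dash_alt
  simp only [PySem.Str.len_eq, build_eq]
  cases h : (PySem.Str.replace element " " "").toList with
  | nil => simp [PySem.Set.ofList_nil]
  | cons f rest =>
    by_cases hall : ∀ c ∈ rest, c = f
    · have h1 : (PySem.Set.ofList (f :: rest)).length = 1 := (ofList_len_one f rest).mpr hall
      simp [h1]
      intro x hx; exact hall x hx
    · have h1 : (PySem.Set.ofList (f :: rest)).length ≠ 1 :=
        fun hc => hall ((ofList_len_one f rest).mp hc)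
      push Not at hall
      obtain ⟨c, hc, hne⟩ := hall
      simp [h1]
      exact ⟨c, hc, hne⟩
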